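-- pv_equiv track=rewrite | github.com/wingsofphoenix2013/v4 | laboratory_v4/laboratory_decision_maker.py | _mw_match_and_required_confirmation
-- ===== SOURCE A (Python) =====
-- from typing import Any, Dict, List, Optional, Tuple
--
-- def _mw_match_and_required_confirmation(
--     mw_rows: List[Dict[str, Any]],
--     states: Dict[str, Optional[str]],
-- ) -> Tuple[bool, Optional[int]]:
--     if not mw_rows:
--         return False, None
--     matched_confs: List[int] = []
--
--     for r in mw_rows:
--         agg_base = (r.get("agg_base") or "").strip().lower()
--         agg_state = (r.get("agg_state") or "").strip().lower()
--         if not agg_base or not agg_state: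
--             continue
--
--         bases = agg_base.split("_")
--         if len(bases) == 1:
--             base = bases[0]
--             st = states.get(base)
--             if not st:
--                 continue
--             fact = st.strip().lower()
--         else:
--             parts, ok = [], True
--             for b in bases:
--                 st = states.get(b)
--                 if not st:
--                     ok = False
--                     break
--                 parts.append(f"{b}:{st.strip().lower()}")
--             if not ok:
--                 continue
--             fact = "|".join(parts)
--
--         if fact == agg_state:
--             try:
--                 matched_confs.append(int(r.get("confirmation")))
--             except Exception:
--                 continue
--
--     if not matched_confs:
--         return False, None
--     if any(c == 0 for c in matched_confs):
--         return True, 0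
--     req = min([c for c in matched_confs if c in (1, 2)], default=None)
--     if req is None:
--         return False, None
--     return True, req
-- ===== SOURCE B (Python) =====
-- from typing import Any, Dict, List, Optional, Tuple
--
-- def _row_conf(r: Dict[str, Any], states: Dict[str, Optional[str]]) -> Optional[int]:
--     agg_base = (r.get("agg_base") or "").strip().lower()
--     agg_state = (r.get("agg_state") or "").strip().lower()
--     if not agg_base or not agg_state:
--         return None
--     bases = agg_base.split("_")
--     sts = [states.get(b) for b in bases]
--     if not all(sts):
--         return None
--     if len(bases) == 1:
--         fact = sts[0].strip().lower()
--     else: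
--         fact = "|".join(f"{b}:{s.strip().lower()}" for b, s in zip(bases, sts))
--     if fact != agg_state:
--         return None
--     try:
--         return int(r.get("confirmation"))
--     except Exception:
--         return None
--
-- def _mw_match_and_required_confirmation(
--     mw_rows: List[Dict[str, Any]],
--     states: Dict[str, Optional[str]],
-- ) -> Tuple[bool, Optional[int]]:
--     best: Optional[int] = None
--     for r in mw_rows:
--         c = _row_conf(r, states)
--         if c == 0:
--             return True, 0
--         if c in (1, 2) and (best is None or c < best):
--             best = c
--     return (best is not None), best
-- ===== Notes on version B (the rewrite author's own statement) =====
-- stated objective: alternative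
-- what changed: A collects all matched confirmations into a list and then aggregates it in three extra passes (any-zero check, filter to {1,2}, min with default); B folds over the rows once, keeping a running best confirmation and returning (True, 0) immediately on a zero, with the row-matching logic factored into a separate _row_conf helper built on comprehensions instead of A's inline flag-and-break loop.
import Mathlib
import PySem

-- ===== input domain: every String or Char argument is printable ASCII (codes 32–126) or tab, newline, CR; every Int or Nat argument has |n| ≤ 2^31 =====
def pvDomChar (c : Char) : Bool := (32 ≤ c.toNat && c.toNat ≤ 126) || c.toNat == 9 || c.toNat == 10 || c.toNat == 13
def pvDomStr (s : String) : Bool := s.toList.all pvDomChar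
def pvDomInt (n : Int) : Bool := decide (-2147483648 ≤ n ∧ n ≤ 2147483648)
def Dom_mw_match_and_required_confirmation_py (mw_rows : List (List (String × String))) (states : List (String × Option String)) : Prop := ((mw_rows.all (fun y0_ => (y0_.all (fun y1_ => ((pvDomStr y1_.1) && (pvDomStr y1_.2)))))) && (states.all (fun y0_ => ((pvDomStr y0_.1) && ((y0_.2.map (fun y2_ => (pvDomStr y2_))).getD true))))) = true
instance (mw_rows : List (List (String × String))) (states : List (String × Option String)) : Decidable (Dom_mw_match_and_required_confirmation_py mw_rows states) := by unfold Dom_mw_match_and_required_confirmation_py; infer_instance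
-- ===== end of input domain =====

-- B replaces A's collect-all-then-aggregate shape by a single online scan keeping a running best
-- confirmation (objective: alternative decomposition, same asymptotic cost; return value only).

-- ===== PORT A =====
-- shared tiny Python idioms: truthiness of `states.get(b)` (an Optional[str]), and `(x or "").strip().lower()`
def pvTruthyOS : Option (Option String) → Bool
  | some (some s) => s ≠ ""
  | _ => false

def pvStripLower (o : Option String) : String := PySem.Str.lower (PySem.Str.strip (o.getD ""))

-- the inner `for b in bases` loop with its ok/break flag (none = broke out with ok = False)
def pvBuildParts (states : List (String × Option String)) (parts : List String) : List String → Option (List String)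
  | [] => some parts
  | b :: bs =>
    let st := (PySem.Dict.mk states).get? b
    if pvTruthyOS st then
      pvBuildParts states (parts ++ [b ++ ":" ++ pvStripLower (st.getD none)]) bs
    else none

-- the body of A's `for r in mw_rows` loop, accumulating matched_confs
def pvAStep (states : List (String × Option String)) (acc : List Int) (r : List (String × String)) : List Int :=
  let agg_base := pvStripLower ((PySem.Dict.mk r).get? "agg_base")
  let agg_state := pvStripLower ((PySem.Dict.mk r).get? "agg_state")
  if agg_base = "" || agg_state = "" then acc else
  let bases := (PySem.Str.split? agg_base "_").getD []   -- sep "_" ≠ "": split? is some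
  let factO : Option String :=
    if bases.length = 1 then
      let st := (PySem.Dict.mk states).get? (bases.headD "")
      if pvTruthyOS st then some (pvStripLower (st.getD none)) else none
    else
      match pvBuildParts states [] bases with
      | none => none
      | some parts => some (PySem.Str.join "|" parts)
  match factO with
  | none => acc
  | some fact =>
    if fact = agg_state then
      -- int(r.get("confirmation")): int(None) raises, int(bad string) raises — both are caught
      match ((PySem.Dict.mk r).get? "confirmation").bind PySem.Int.ofStr? with
      | some c => acc ++ [c]
      | none => acc
    else acc

def mw_match_and_required_confirmation_py (mw_rows : List (List (String × String))) (states : List (String × Option String)) : Bool × Option Int :=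
  if mw_rows = [] then (false, none) else
  let matched_confs : List Int := mw_rows.foldl (pvAStep states) []
  if matched_confs = [] then (false, none)
  else if matched_confs.any (fun c => c == 0) then (true, some 0)
  else
    match PySem.List.min? (matched_confs.filter (fun c => c == 1 || c == 2)) (fun c => c) with
    | none => (false, none)
    | some req => (true, some req)

-- ===== PORT B =====
def pvRowConf (states : List (String × Option String)) (r : List (String × String)) : Option Int :=
  let agg_base := pvStripLower ((PySem.Dict.mk r).get? "agg_base")
  let agg_state := pvStripLower ((PySem.Dict.mk r).get? "agg_state")
  if agg_base = "" || agg_state = "" then none else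
  let bases := (PySem.Str.split? agg_base "_").getD []   -- sep "_" ≠ "": split? is some
  let sts := bases.map (fun b => (PySem.Dict.mk states).get? b)
  if ¬ sts.all pvTruthyOS then none else
  let fact :=
    if bases.length = 1 then pvStripLower ((sts.headD none).getD none)
    else PySem.Str.join "|" ((bases.zip sts).map (fun p => p.1 ++ ":" ++ pvStripLower (p.2.getD none)))
  if fact ≠ agg_state then none
  else ((PySem.Dict.mk r).get? "confirmation").bind PySem.Int.ofStr?

def pvScan (states : List (String × Option String)) : List (List (String × String)) → Option Int → Bool × Option Int
  | [], best => (best.isSome, best)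
  | r :: rest, best =>
    match pvRowConf states r with
    | some c =>
      if c = 0 then (true, some 0)
      else pvScan states rest (if (c == 1 || c == 2) && (best.isNone || c < best.getD 0) then some c else best)
    | none => pvScan states rest best

def mw_match_and_required_confirmation_py_alt (mw_rows : List (List (String × String))) (states : List (String × Option String)) : Bool × Option Int :=
  pvScan states mw_rows none

-- ===== PRECONDITION & SPEC =====
def Spec_mw_match_and_required_confirmation_py (mw_rows : List (List (String × String))) (states : List (String × Option String)) (out : Bool × Option Int) : Prop := out = mw_match_and_required_confirmation_py_alt mw_rows states
instance (mw_rows : List (List (String × String))) (states : List (String × Option String)) (out : Bool × Option Int) : Decidable (Spec_mw_match_and_required_confirmation_py mw_rows states out) := by unfold Spec_mw_match_and_required_confirmation_py; infer_instance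

-- ===== CLAIM (what is proved, stated in full; the proofs are below) =====
def Claim_equal_mw_match_and_required_confirmation_py : Prop := ∀ (mw_rows : List (List (String × String))) (states : List (String × Option String)), Dom_mw_match_and_required_confirmation_py mw_rows states → Spec_mw_match_and_required_confirmation_py mw_rows states (mw_match_and_required_confirmation_py mw_rows states)

-- ===== LEMMAS AND PROOFS =====

-- A's aggregation of the collected confirmations, as a function of that list
def pvFinal (l : List Int) : Bool × Option Int :=
  if l.any (fun c => c == 0) then (true, some 0)
  else
    match PySem.List.min? (l.filter (fun c => c == 1 || c == 2)) (fun c => c) with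
    | none => (false, none)
    | some req => (true, some req)

theorem pvBuildParts_eq (states : List (String × Option String)) (parts : List String) (bases : List String) :
    pvBuildParts states parts bases =
      if bases.all (fun b => pvTruthyOS ((PySem.Dict.mk states).get? b)) then
        some (parts ++ bases.map (fun b => b ++ ":" ++ pvStripLower (((PySem.Dict.mk states).get? b).getD none)))
      else none := by
  induction bases generalizing parts with
  | nil => simp [pvBuildParts]
  | cons b bs ih =>
    simp only [pvBuildParts, List.all_cons, List.map_cons]
    by_cases h : pvTruthyOS ((PySem.Dict.mk states).get? b)
    · simp [h, ih]
    · simp [h]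

theorem pvZipMapMap (f : String → Option (Option String)) (g : String × Option (Option String) → String)
    (l : List String) : (l.zip (l.map f)).map g = l.map (fun b => g (b, f b)) := by
  induction l with
  | nil => rfl
  | cons x xs ih => simp [ih]

theorem pvAStep_eq (states : List (String × Option String)) (acc : List Int) (r : List (String × String)) :
    pvAStep states acc r = acc ++ (pvRowConf states r).toList := by
  unfold pvAStep pvRowConf
  by_cases h1 : (pvStripLower ((PySem.Dict.mk r).get? "agg_base") = "" ||
      pvStripLower ((PySem.Dict.mk r).get? "agg_state") = "") = true
  · simp [h1]
  · rw [if_neg (by simp [h1]), if_neg (by simp [h1])]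
    set bases := (PySem.Str.split? (pvStripLower ((PySem.Dict.mk r).get? "agg_base")) "_").getD [] with hbases
    clear_value bases
    clear hbases
    by_cases hlen : bases.length = 1
    · obtain ⟨b0, hb0⟩ : ∃ b0, bases = [b0] := List.length_eq_one_iff.mp hlen
      by_cases htr : pvTruthyOS ((PySem.Dict.mk states).get? b0)
      · simp only [hb0]
        simp [htr]
        split_ifs with hf
        · cases ((PySem.Dict.mk r).get? "confirmation").bind PySem.Int.ofStr? <;> simp
        · simp
      · simp only [hb0]
        simp [htr]
    · by_cases hA : bases.all (fun b => pvTruthyOS ((PySem.Dict.mk states).get? b))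
      · have hmap : ((bases.map (fun b => (PySem.Dict.mk states).get? b)).all pvTruthyOS) = true := by
          simpa [List.all_map, Function.comp] using hA
        simp only [pvBuildParts_eq, if_pos hA, if_neg hlen]
        simp [hmap]
        rw [pvZipMapMap]
        split_ifs with hf
        · cases ((PySem.Dict.mk r).get? "confirmation").bind PySem.Int.ofStr? <;> simp
        · simp
      · simp only [pvBuildParts_eq]
        simp [hA, hlen]
        intro hall2 _
        exact ((hA (List.all_eq_true.mpr hall2)).elim : _)

theorem pvFoldl_eq (states : List (String × Option String)) (rows : List (List (String × String))) (acc : List Int) :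
    rows.foldl (pvAStep states) acc = acc ++ rows.filterMap (pvRowConf states) := by
  induction rows generalizing acc with
  | nil => simp
  | cons r rest ih =>
    simp only [List.foldl_cons, ih, pvAStep_eq, List.filterMap_cons]
    cases pvRowConf states r <;> simp

-- a confirmation outside {1, 2} (and ≠ 0) changes nothing in A's aggregation
theorem pvFinal_skip (c : Int) (hc : c ≠ 0) (h12 : (c == 1 || c == 2) = false)
    (bl t : List Int) :
    pvFinal (bl ++ t) = pvFinal (bl ++ c :: t) := by
  have hc0 : (c == 0) = false := by simpa using hc
  have hany : ((bl ++ c :: t).any (fun x => x == 0)) = ((bl ++ t).any (fun x => x == 0)) := by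
    simp only [List.any_append, List.any_cons, hc0, Bool.false_or]
  have hfil : (bl ++ c :: t).filter (fun x => x == 1 || x == 2) =
      (bl ++ t).filter (fun x => x == 1 || x == 2) := by
    simp only [List.filter_append, List.filter_cons, h12]
    simp
  unfold pvFinal
  rw [hany, hfil]

-- taking the min of two matched confirmations from {1, 2} up front agrees with A's aggregation
theorem pvFinal_min (b c : Int) (hb : b = 1 ∨ b = 2) (hc : c = 1 ∨ c = 2) (t : List Int) :
    pvFinal (min b c :: t) = pvFinal (b :: c :: t) := by
  have hb0 : (b == 0) = false := by rcases hb with h | h <;> simp [h]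
  have hc0 : (c == 0) = false := by rcases hc with h | h <;> simp [h]
  have hm12 : min b c = b ∨ min b c = c := by rcases le_total b c with h | h <;> simp [h]
  have hm0 : ((min b c) == 0) = false := by rcases hm12 with h | h <;> rw [h] <;> assumption
  have hbp : (b == 1 || b == 2) = true := by rcases hb with h | h <;> simp [h]
  have hcp : (c == 1 || c == 2) = true := by rcases hc with h | h <;> simp [h]
  have hmp : ((min b c) == 1 || (min b c) == 2) = true := by
    rcases hm12 with h | h <;> rw [h] <;> assumption
  unfold pvFinal
  simp only [List.any_cons, hb0, hc0, hm0, Bool.false_or]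
  simp only [List.filter_cons, hbp, hcp, hmp, if_pos]
  rw [PySem.List.min?_id_cons, PySem.List.min?_id_cons]
  simp only [List.foldl_cons]

-- moving one nonzero matched confirmation into the running best preserves A's aggregation
theorem pvFinal_step (c : Int) (hc : c ≠ 0) (best : Option Int)
    (hbest : best = none ∨ best = some 1 ∨ best = some 2) (t : List Int) :
    pvFinal (((if (c == 1 || c == 2) && (best.isNone || c < best.getD 0) then some c else best).toList) ++ t) =
    pvFinal (best.toList ++ c :: t) := by
  by_cases h12 : (c == 1 || c == 2) = true
  · have hc12 : c = 1 ∨ c = 2 := by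
      rcases (Bool.or_eq_true _ _).mp h12 with h | h <;> simp at h <;> omega
    rcases hbest with hb | hb | hb <;> subst hb
    · simp [h12]
    · have hif : (if (c == 1 || c == 2) && ((some (1:Int)).isNone || c < (some (1:Int)).getD 0)
          then some c else some 1) = some (min 1 c) := by
        rcases hc12 with rfl | rfl <;> simp
      rw [hif]
      simpa using pvFinal_min 1 c (Or.inl rfl) hc12 t
    · have hif : (if (c == 1 || c == 2) && ((some (2:Int)).isNone || c < (some (2:Int)).getD 0)
          then some c else some 2) = some (min 2 c) := by
        rcases hc12 with rfl | rfl <;> simp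
      rw [hif]
      simpa using pvFinal_min 2 c (Or.inr rfl) hc12 t
  · have h12' : (c == 1 || c == 2) = false := by simpa using h12
    rw [if_neg (by simp [h12'])]
    exact pvFinal_skip c hc h12' best.toList t

theorem pvScan_eq (states : List (String × Option String)) (rows : List (List (String × String)))
    (best : Option Int) (hbest : best = none ∨ best = some 1 ∨ best = some 2) :
    pvScan states rows best = pvFinal (best.toList ++ rows.filterMap (pvRowConf states)) := by
  induction rows generalizing best with
  | nil =>
    rcases hbest with h | h | h <;> simp [h, pvScan, pvFinal, PySem.List.min?]
  | cons r rest ih =>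
    simp only [pvScan, List.filterMap_cons]
    cases hc : pvRowConf states r with
    | none => simp [ih best hbest]
    | some c =>
      dsimp only
      by_cases hc0 : c = 0
      · subst hc0
        rw [if_pos rfl]
        have h0 : ((best.toList ++ (0 : Int) :: rest.filterMap (pvRowConf states)).any (fun c => c == 0)) = true := by
          simp
        simp [pvFinal, h0]
      · rw [if_neg hc0]
        set best' := if (c == 1 || c == 2) && (best.isNone || c < best.getD 0) then some c else best with hb'
        have hbest' : best' = none ∨ best' = some 1 ∨ best' = some 2 := by
          rw [hb']; split_ifs with h
          · have h1 := ((Bool.and_eq_true _ _).mp h).1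
            have : c = 1 ∨ c = 2 := by
              rcases (Bool.or_eq_true _ _).mp h1 with h2 | h2 <;> simp at h2 <;> omega
            rcases this with h | h <;> simp [h]
          · exact hbest
        rw [ih best' hbest', hb']
        exact pvFinal_step c hc0 best hbest _

-- ===== VERDICT (by name: the statement is the Claim_ definition above) =====
theorem mw_match_and_required_confirmation_py_spec : Claim_equal_mw_match_and_required_confirmation_py := by
  intro rows states _
  unfold Spec_mw_match_and_required_confirmation_py mw_match_and_required_confirmation_py
    mw_match_and_required_confirmation_py_alt
  rw [pvScan_eq states rows none (Or.inl rfl)]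
  by_cases hnil : rows = []
  · subst hnil; simp [pvFinal, PySem.List.min?]
  · rw [if_neg hnil, pvFoldl_eq]
    simp only [List.nil_append, Option.toList_none]
    by_cases hm : rows.filterMap (pvRowConf states) = []
    · simp [hm, pvFinal, PySem.List.min?]
    · rw [if_neg hm]; rfl
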